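-- pv_equiv track=rewrite | github.com/xupStudio/pawcorder | admin/app/dahua_api.py | _classify_interfaces
-- ===== SOURCE A (Python) =====
-- def _classify_interfaces(interfaces: list[dict[str, str]]) -> str:
--     """Map a list of Dahua netApp interfaces to 'wifi' | 'wired' | 'unknown'.
--
--     Preference order: a wireless interface with a non-empty IP wins. Falling
--     back to any wireless type, then any eth type, then 'unknown'. Dahua does
--     not distinguish PoE vs adapter-fed Ethernet, and Frigate doesn't care.
--     """
--     if not interfaces:
--         return "unknown"
--     wireless = [i for i in interfaces if i.get("Type", "").lower() == "wireless"]
--     wired = [i for i in interfaces if i.get("Type", "").lower() == "eth"]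
--     # If a wireless iface has an IP it is the active link.
--     for iface in wireless:
--         ip = iface.get("IPAddress") or iface.get("Address") or ""
--         if ip and ip != "0.0.0.0":
--             return "wifi"
--     if wireless and not wired:
--         return "wifi"
--     if wired:
--         return "wired"
--     return "unknown"
-- ===== SOURCE B (Python) =====
-- def _classify_interfaces(interfaces: list[dict[str, str]]) -> str:
--     """Single pass with three flags instead of building filtered lists."""
--     has_wireless = has_wired = active_wifi = False
--     for iface in interfaces:
--         t = iface.get("Type", "").lower()
--         if t == "wireless":
--             has_wireless = True
--             ip = iface.get("IPAddress") or iface.get("Address") or ""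
--             if ip and ip != "0.0.0.0":
--                 active_wifi = True
--         elif t == "eth":
--             has_wired = True
--     if active_wifi:
--         return "wifi"
--     if has_wireless and not has_wired:
--         return "wifi"
--     if has_wired:
--         return "wired"
--     return "unknown"
-- ===== Notes on version B (the rewrite author's own statement) =====
-- stated objective: simpler
-- what changed: Replaces the two intermediate filtered lists and the extra scan over the wireless list with a single pass that maintains three booleans (has_wireless, has_wired, active_wifi) and one final branch cascade; no explicit empty-list guard is needed.
import Mathlib
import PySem

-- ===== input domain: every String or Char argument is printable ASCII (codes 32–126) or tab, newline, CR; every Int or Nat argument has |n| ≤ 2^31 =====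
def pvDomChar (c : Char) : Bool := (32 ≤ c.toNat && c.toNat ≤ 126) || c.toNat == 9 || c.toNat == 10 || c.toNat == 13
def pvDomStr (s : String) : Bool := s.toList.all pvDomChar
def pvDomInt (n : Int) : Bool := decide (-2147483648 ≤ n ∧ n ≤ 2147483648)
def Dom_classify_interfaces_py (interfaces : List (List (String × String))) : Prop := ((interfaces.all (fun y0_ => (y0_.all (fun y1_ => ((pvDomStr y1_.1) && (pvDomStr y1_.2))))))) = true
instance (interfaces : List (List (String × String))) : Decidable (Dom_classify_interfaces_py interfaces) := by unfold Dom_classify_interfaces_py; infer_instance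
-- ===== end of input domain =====

-- B replaces A's two filtered lists and extra scan by one pass maintaining three booleans (simpler decomposition, same O(n) cost).

-- ===== PORT A =====
-- Python `a or b` on Option String/str operands: falsy = none or "".
def pvA_orStr (o : Option String) (b : String) : String :=
  match o with
  | some s => if s = "" then b else s
  | none => b

-- the body of A's `for iface in wireless: … return "wifi"` loop condition
def pvA_activeIP (iface : List (String × String)) : Bool :=
  let ip := pvA_orStr (PySem.Dict.get? (PySem.Dict.mk iface) "IPAddress")
              (pvA_orStr (PySem.Dict.get? (PySem.Dict.mk iface) "Address") "")
  ip != "" && ip != "0.0.0.0"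

def classify_interfaces_py (interfaces : List (List (String × String))) : String :=
  if interfaces.isEmpty then "unknown"
  else
    let wireless := interfaces.filter
      (fun i => PySem.Str.lower (PySem.Dict.getD (PySem.Dict.mk i) "Type" "") == "wireless")
    let wired := interfaces.filter
      (fun i => PySem.Str.lower (PySem.Dict.getD (PySem.Dict.mk i) "Type" "") == "eth")
    -- `for iface in wireless: if ip and ip != "0.0.0.0": return "wifi"`
    if wireless.any pvA_activeIP then "wifi"
    else if !wireless.isEmpty && wired.isEmpty then "wifi"
    else if !wired.isEmpty then "wired"
    else "unknown"

-- ===== PORT B =====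
def pvB_orStr (o : Option String) (b : String) : String :=
  match o with
  | some s => if s = "" then b else s
  | none => b

-- one loop step over state (has_wireless, has_wired, active_wifi)
def pvB_step (st : Bool × Bool × Bool) (iface : List (String × String)) : Bool × Bool × Bool :=
  let t := PySem.Str.lower (PySem.Dict.getD (PySem.Dict.mk iface) "Type" "")
  if t == "wireless" then
    let ip := pvB_orStr (PySem.Dict.get? (PySem.Dict.mk iface) "IPAddress")
                (pvB_orStr (PySem.Dict.get? (PySem.Dict.mk iface) "Address") "")
    (true, st.2.1, st.2.2 || (ip != "" && ip != "0.0.0.0"))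
  else if t == "eth" then (st.1, true, st.2.2)
  else st

def classify_interfaces_py_alt (interfaces : List (List (String × String))) : String :=
  let st := interfaces.foldl pvB_step (false, false, false)
  if st.2.2 then "wifi"
  else if st.1 && !st.2.1 then "wifi"
  else if st.2.1 then "wired"
  else "unknown"

-- ===== PRECONDITION & SPEC =====
def Spec_classify_interfaces_py (interfaces : List (List (String × String))) (out : String) : Prop := out = classify_interfaces_py_alt interfaces
instance (interfaces : List (List (String × String))) (out : String) : Decidable (Spec_classify_interfaces_py interfaces out) := by unfold Spec_classify_interfaces_py; infer_instance

-- ===== CLAIM (what is proved, stated in full; the proofs are below) =====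
def Claim_equal_classify_interfaces_py : Prop := ∀ (interfaces : List (List (String × String))), Dom_classify_interfaces_py interfaces → Spec_classify_interfaces_py interfaces (classify_interfaces_py interfaces)

-- ===== LEMMAS AND PROOFS =====
def pvIsW (i : List (String × String)) : Bool :=
  PySem.Str.lower (PySem.Dict.getD (PySem.Dict.mk i) "Type" "") == "wireless"

def pvIsE (i : List (String × String)) : Bool :=
  PySem.Str.lower (PySem.Dict.getD (PySem.Dict.mk i) "Type" "") == "eth"

theorem pvIsW_not_isE (i : List (String × String)) (h : pvIsW i = true) : pvIsE i = false := by
  unfold pvIsW at h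
  unfold pvIsE
  have := beq_iff_eq.mp h
  rw [this]
  decide

theorem pvB_fold_eq (l : List (List (String × String))) (a b c : Bool) :
    l.foldl pvB_step (a, b, c) =
      (a || l.any pvIsW, b || l.any pvIsE, c || l.any (fun i => pvIsW i && pvA_activeIP i)) := by
  induction l generalizing a b c with
  | nil => simp
  | cons x xs ih =>
    simp only [List.foldl_cons, List.any_cons]
    by_cases hw : pvIsW x = true
    · have he := pvIsW_not_isE x hw
      have hstep : pvB_step (a, b, c) x =
          (true, b, c || pvA_activeIP x) := by
        unfold pvB_step pvA_activeIP pvB_orStr pvA_orStr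
        unfold pvIsW at hw
        simp [hw]
      rw [hstep, ih]
      simp [hw, he, Bool.or_assoc]
    · have hw' : pvIsW x = false := by simpa using hw
      by_cases he : pvIsE x = true
      · have hstep : pvB_step (a, b, c) x = (a, true, c) := by
          unfold pvB_step
          unfold pvIsW at hw'
          unfold pvIsE at he
          simp [hw', he]
        rw [hstep, ih]
        simp [hw', he]
      · have he' : pvIsE x = false := by simpa using he
        have hstep : pvB_step (a, b, c) x = (a, b, c) := by
          unfold pvB_step
          unfold pvIsW at hw'
          unfold pvIsE at he'
          simp [hw', he']
        rw [hstep, ih]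
        simp [hw', he']

theorem pv_isEmpty_filter (p : List (String × String) → Bool) (l : List (List (String × String))) :
    (l.filter p).isEmpty = !l.any p := by
  induction l with
  | nil => rfl
  | cons x xs ih =>
    by_cases h : p x = true <;> simp [List.any_cons, h, ih]

theorem pv_any_filter (p q : List (String × String) → Bool) (l : List (List (String × String))) :
    (l.filter p).any q = l.any (fun i => p i && q i) := by
  induction l with
  | nil => rfl
  | cons x xs ih =>
    by_cases h : p x = true <;> simp [List.any_cons, h, ih]

-- ===== VERDICT (by name: the statement is the Claim_ definition above) =====
theorem classify_interfaces_py_spec : Claim_equal_classify_interfaces_py := by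
  intro interfaces _
  show classify_interfaces_py interfaces = classify_interfaces_py_alt interfaces
  unfold classify_interfaces_py classify_interfaces_py_alt
  rw [pvB_fold_eq]
  cases interfaces with
  | nil => rfl
  | cons x xs =>
    simp only [List.isEmpty_cons, if_neg (by decide : ¬ (false = true))]
    rw [pv_any_filter, pv_isEmpty_filter, pv_isEmpty_filter]
    simp only [Bool.false_or, Bool.not_not]
    rfl
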